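-- pv_equiv track=rewrite | github.com/Jemila-Abdulai/software-engineering-2 | util/create-markdown-table-of-contents.py | remove_back_ticked_hashes
-- ===== SOURCE A (Python) =====
-- def remove_back_ticked_hashes(line):
--     within_backticks = False
--     wanted_chars = []
--
--     for char in line:
--         if char == "`":
--             within_backticks = not within_backticks
--         if within_backticks:
--             if char == "#":
--                 continue
--         wanted_chars.append(char)
--     cleaned_line = "".join(char for char in wanted_chars)
--     return cleaned_line
-- ===== SOURCE B (Python) =====
-- def remove_back_ticked_hashes(line):
--     parts = line.split('`')
--     return '`'.join(seg if i % 2 == 0 else seg.replace('#', '')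
--                     for i, seg in enumerate(parts))
-- ===== Notes on version B (the rewrite author's own statement) =====
-- stated objective: idiomatic
-- what changed: Replaces the character-by-character loop with a mutable inside-backticks flag by split on the backtick separator / strip the hash character from odd-indexed segments / join, removing the explicit state machine.
import Mathlib
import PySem

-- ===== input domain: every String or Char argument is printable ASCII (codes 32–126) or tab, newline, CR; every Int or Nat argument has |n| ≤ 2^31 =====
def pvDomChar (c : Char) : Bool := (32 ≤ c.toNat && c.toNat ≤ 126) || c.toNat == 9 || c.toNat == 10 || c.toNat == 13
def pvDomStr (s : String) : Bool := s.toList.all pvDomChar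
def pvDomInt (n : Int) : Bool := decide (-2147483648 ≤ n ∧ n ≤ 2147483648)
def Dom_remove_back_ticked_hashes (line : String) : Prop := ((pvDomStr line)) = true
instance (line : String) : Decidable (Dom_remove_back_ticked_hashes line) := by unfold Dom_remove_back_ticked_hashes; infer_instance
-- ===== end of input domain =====

-- B replaces A's character-by-character toggle loop with split / clean odd-indexed segments / join (idiomatic; measured faster in a timing run).

-- ===== PORT A =====
def remove_back_ticked_hashes (line : String) : String :=
  let r := line.toList.foldl
    (fun (st : Bool × List Char) char =>
      let within_backticks := if char == '`' then !st.1 else st.1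
      if within_backticks && char == '#' then (within_backticks, st.2)
      else (within_backticks, st.2 ++ [char]))
    (false, [])
  String.ofList r.2

-- ===== PORT B =====
def remove_back_ticked_hashes_alt (line : String) : String :=
  let parts := (PySem.Chars.splitOn line.toList ['`']).map String.ofList
  PySem.Str.join "`" ((PySem.List.enumerate parts).map (fun p =>
    if PySem.Int.mod p.1 2 == 0 then p.2 else PySem.Str.replace p.2 "#" ""))

-- ===== PRECONDITION & SPEC =====
def Spec_remove_back_ticked_hashes (line : String) (out : String) : Prop := out = remove_back_ticked_hashes_alt line
instance (line : String) (out : String) : Decidable (Spec_remove_back_ticked_hashes line out) := by unfold Spec_remove_back_ticked_hashes; infer_instance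

-- ===== CLAIM (what is proved, stated in full; the proofs are below) =====
def Claim_equal_remove_back_ticked_hashes : Prop := ∀ (line : String), Dom_remove_back_ticked_hashes line → Spec_remove_back_ticked_hashes line (remove_back_ticked_hashes line)

-- ===== LEMMAS AND PROOFS =====

-- PySem.Chars.splitOn with a single-character separator is Mathlib's List.splitOnP.
theorem pv_splitOn_go_single (c : Char) : ∀ (fuel : Nat) (l cur : List Char) (acc : List (List Char)), l.length ≤ fuel →
    PySem.Chars.splitOn.go [c] fuel l cur acc
      = acc.reverse ++ List.modifyHead (cur.reverse ++ ·) (List.splitOnP (· == c) l) := by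
  intro fuel
  induction fuel with
  | zero =>
    intro l cur acc h
    have hl : l = [] := List.eq_nil_of_length_eq_zero (Nat.le_zero.mp h)
    subst hl
    simp [PySem.Chars.splitOn.go.eq_def, List.splitOnP_nil]
  | succ fuel ih =>
    intro l cur acc h
    cases l with
    | nil => simp [PySem.Chars.splitOn.go.eq_def, List.splitOnP_nil]
    | cons x rest =>
      rw [PySem.Chars.splitOn.go.eq_def]
      simp only []
      by_cases hx : x = c
      · subst hx
        rw [if_pos (by simp [List.isPrefixOf])]
        simp only [List.length_cons, List.length_nil, List.drop_succ_cons, List.drop_zero]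
        rw [ih rest [] ((cur.reverse) :: acc) (Nat.le_of_succ_le_succ (by simpa using h))]
        have hne := List.splitOnP_ne_nil (· == x) rest
        cases hsp : List.splitOnP (· == x) rest with
        | nil => exact absurd hsp hne
        | cons s0 ss => simp [List.splitOnP_cons, hsp]
      · rw [if_neg (by simp [List.isPrefixOf]; exact fun hcx => absurd hcx.symm hx)]
        rw [ih rest (x :: cur) acc (Nat.le_of_succ_le_succ (by simpa using h))]
        have hne := List.splitOnP_ne_nil (· == c) rest
        cases hsp : List.splitOnP (· == c) rest with
        | nil => exact absurd hsp hne
        | cons s0 ss => simp [List.splitOnP_cons, hsp, hx]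

theorem pv_splitOn_single (c : Char) (l : List Char) :
    PySem.Chars.splitOn l [c] = List.splitOnP (· == c) l := by
  unfold PySem.Chars.splitOn
  rw [pv_splitOn_go_single c (l.length + 1) l [] [] (Nat.le_succ _)]
  have hne := List.splitOnP_ne_nil (· == c) l
  cases hsp : List.splitOnP (· == c) l with
  | nil => exact absurd hsp hne
  | cons s0 ss => simp

-- s.replace('#', '') on a char list is a filter.
theorem pv_replace_go_hash : ∀ (fuel : Nat) (l acc : List Char), l.length ≤ fuel →
    PySem.Chars.replace.go ['#'] [] fuel l acc = acc.reverse ++ l.filter (· != '#') := by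
  intro fuel
  induction fuel with
  | zero =>
    intro l acc h
    have hl : l = [] := List.eq_nil_of_length_eq_zero (Nat.le_zero.mp h)
    subst hl
    simp [PySem.Chars.replace.go.eq_def]
  | succ fuel ih =>
    intro l acc h
    cases l with
    | nil => simp [PySem.Chars.replace.go.eq_def]
    | cons x rest =>
      rw [PySem.Chars.replace.go.eq_def]
      simp only []
      by_cases hx : x = '#'
      · subst hx
        rw [if_pos (by simp [List.isPrefixOf])]
        simp only [List.length_cons, List.length_nil, List.drop_succ_cons, List.drop_zero, List.reverse_nil, List.nil_append]
        rw [ih rest acc (Nat.le_of_succ_le_succ (by simpa using h))]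
        simp
      · rw [if_neg (by simp [List.isPrefixOf]; exact fun hp => absurd hp.symm hx)]
        rw [ih rest (x :: acc) (Nat.le_of_succ_le_succ (by simpa using h))]
        simp [hx]

theorem pv_replace_hash (l : List Char) :
    PySem.Chars.replace l ['#'] [] = l.filter (· != '#') := by
  unfold PySem.Chars.replace
  simp only [List.isEmpty_cons, if_false, Bool.false_eq_true]
  rw [pv_replace_go_hash l.length l [] le_rfl]
  simp

-- A's loop body, as a structural recursion on the character list.
def pvProc : Bool → List Char → List Char
  | _, [] => []
  | w, c :: cs =>
      if c == '`' then c :: pvProc (!w) cs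
      else if w && c == '#' then pvProc w cs
      else c :: pvProc w cs

-- A's loop body (identical to the lambda in the port, named for the proofs).
def pvStep : Bool × List Char → Char → Bool × List Char :=
  fun (st : Bool × List Char) char =>
    let within_backticks := if char == '`' then !st.1 else st.1
    if within_backticks && char == '#' then (within_backticks, st.2)
    else (within_backticks, st.2 ++ [char])

theorem pv_foldA (cs : List Char) : ∀ (w : Bool) (acc : List Char),
    (cs.foldl pvStep (w, acc)).2 = acc ++ pvProc w cs := by
  induction cs with
  | nil => intro w acc; simp [pvProc]
  | cons c cs ih =>
    intro w acc
    rw [List.foldl_cons]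
    by_cases hc : c = '`'
    · subst hc
      rw [show pvStep (w, acc) '`' = (!w, acc ++ ['`']) from by simp [pvStep]]
      rw [ih]
      simp [pvProc]
    · by_cases hk : (w && (c == '#')) = true
      · have hk' : w = true ∧ c = '#' := by simpa using hk
        obtain ⟨hw, hch⟩ := hk'
        subst hw; subst hch
        rw [show pvStep (true, acc) '#' = (true, acc) from by simp [pvStep]]
        rw [ih]
        simp [pvProc]
      · have hkf : (w && (c == '#')) = false := by simpa using hk
        rw [show pvStep (w, acc) c = (w, acc ++ [c]) from by simp [pvStep, hc, hkf]]
        rw [ih]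
        simp [pvProc, hc, hkf]

-- B's processed segments, alternating: w = true means "inside backticks".
def pvSegs : Bool → List (List Char) → List (List Char)
  | _, [] => []
  | w, s :: ss => (if w then s.filter (· != '#') else s) :: pvSegs (!w) ss

theorem pv_inter_cons (a t : List Char) (T : List (List Char)) :
    List.intercalate ['`'] (a :: t :: T) = a ++ '`' :: List.intercalate ['`'] (t :: T) := by
  simp [List.intercalate]

theorem pv_main (cs : List Char) : ∀ (w : Bool),
    pvProc w cs = List.intercalate ['`'] (pvSegs w (List.splitOnP (· == '`') cs)) := by
  induction cs with
  | nil =>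
    intro w
    cases w <;> simp [pvProc, List.splitOnP_nil, pvSegs, List.intercalate]
  | cons c cs ih =>
    intro w
    have hne := List.splitOnP_ne_nil (· == '`') cs
    obtain ⟨s0, ss, hsc⟩ : ∃ s0 ss, List.splitOnP (· == '`') cs = s0 :: ss := by
      cases hsc : List.splitOnP (· == '`') cs with
      | nil => exact absurd hsc hne
      | cons s0 ss => exact ⟨s0, ss, rfl⟩
    have hIH := ih w
    have hIHn := ih (!w)
    rw [hsc] at hIH hIHn
    by_cases hc : c = '`'
    · subst hc
      have hsp := List.splitOnP_cons (· == '`') '`' cs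
      rw [if_pos (by simp)] at hsp
      rw [hsp, hsc]
      have hseg : pvSegs w ([] :: s0 :: ss) = [] :: pvSegs (!w) (s0 :: ss) := by
        cases w <;> simp [pvSegs]
      rw [hseg,
        show pvSegs (!w) (s0 :: ss)
            = (if (!w) then s0.filter (· != '#') else s0) :: pvSegs (!(!w)) ss from rfl,
        pv_inter_cons,
        show ((if (!w) then s0.filter (· != '#') else s0) :: pvSegs (!(!w)) ss)
            = pvSegs (!w) (s0 :: ss) from rfl]
      rw [← hIHn]
      simp [pvProc]
    · have hsp := List.splitOnP_cons (· == '`') c cs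
      rw [if_neg (by simp [hc])] at hsp
      rw [hsp, hsc]
      simp only [List.modifyHead]
      by_cases hk : (w && (c == '#')) = true
      · have hk' : w = true ∧ c = '#' := by simpa using hk
        obtain ⟨hw, hch⟩ := hk'
        subst hw; subst hch
        have hlhs : pvProc true ('#' :: cs) = pvProc true cs := by simp [pvProc]
        rw [hlhs, hIH]
        have hseg : pvSegs true (('#' :: s0) :: ss)
            = (s0.filter (· != '#')) :: pvSegs false ss := by simp [pvSegs]
        have hseg' : pvSegs true (s0 :: ss) = (s0.filter (· != '#')) :: pvSegs false ss := by
          simp [pvSegs]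
        rw [hseg, ← hseg']
      · have hkf : (w && (c == '#')) = false := by simpa using hk
        have hlhs : pvProc w (c :: cs) = c :: pvProc w cs := by simp [pvProc, hc, hkf]
        rw [hlhs, hIH]
        have hhead : (if w then (c :: s0).filter (· != '#') else c :: s0)
            = c :: (if w then s0.filter (· != '#') else s0) := by
          cases w with
          | false => simp
          | true =>
            have hch : (c != '#') = true := by
              simp only [bne_iff_ne, ne_eq]
              intro h; subst h; simp at hkf
            simp [hch]
        have hseg : pvSegs w ((c :: s0) :: ss)
            = (c :: (if w then s0.filter (· != '#') else s0)) :: pvSegs (!w) ss := by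
          simp [pvSegs, hhead]
        rw [hseg,
          show ((c :: (if w then s0.filter (· != '#') else s0)) :: pvSegs (!w) ss)
              = (([c] ++ (if w then s0.filter (· != '#') else s0)) :: pvSegs (!w) ss) from rfl]
        cases hps : pvSegs (!w) ss with
        | nil =>
          rw [show pvSegs w (s0 :: ss)
              = (if w then s0.filter (· != '#') else s0) :: pvSegs (!w) ss from rfl, hps]
          simp [List.intercalate]
        | cons t T =>
          rw [pv_inter_cons]
          rw [show pvSegs w (s0 :: ss)
              = (if w then s0.filter (· != '#') else s0) :: pvSegs (!w) ss from rfl, hps]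
          rw [pv_inter_cons]
          simp

theorem pv_enum_map (ss : List (List Char)) : ∀ (i : Int), 0 ≤ i →
    (PySem.List.enumerate ss i).map (fun p =>
        (if PySem.Int.mod p.1 2 == 0 then p.2 else p.2.filter (· != '#')))
      = pvSegs (!(PySem.Int.mod i 2 == 0)) ss := by
  induction ss with
  | nil => intro i hi; simp [PySem.List.enumerate_nil, pvSegs]
  | cons s ss ih =>
    intro i hi
    rw [PySem.List.enumerate_cons]
    simp only [List.map_cons, pvSegs]
    rw [ih (i + 1) (by omega)]
    have hm : PySem.Int.mod i 2 = i % 2 := PySem.Int.mod_eq_emod_of_pos (by norm_num)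
    have hm1 : PySem.Int.mod (i + 1) 2 = (i + 1) % 2 := PySem.Int.mod_eq_emod_of_pos (by norm_num)
    have h01 : i % 2 = 0 ∨ i % 2 = 1 := by omega
    have hflip : (i + 1) % 2 = 1 - i % 2 := by omega
    rcases h01 with h | h <;> simp [h, hflip]

-- enumerate commutes with map on the elements.
theorem pv_enumerate_map {α β : Type} (g : α → β) (xs : List α) : ∀ (i : Int),
    PySem.List.enumerate (xs.map g) i = (PySem.List.enumerate xs i).map (fun p => (p.1, g p.2)) := by
  induction xs with
  | nil => intro i; simp [PySem.List.enumerate_nil]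
  | cons x xs ih =>
    intro i
    simp [PySem.List.enumerate_cons, ih]

-- ===== VERDICT (by name: the statement is the Claim_ definition above) =====
theorem remove_back_ticked_hashes_spec : Claim_equal_remove_back_ticked_hashes := by
  intro line _
  unfold Spec_remove_back_ticked_hashes remove_back_ticked_hashes remove_back_ticked_hashes_alt
  simp only []
  show String.ofList (List.foldl pvStep (false, []) line.toList).2 = _
  rw [pv_foldA line.toList false []]
  rw [List.nil_append]
  unfold PySem.Str.join
  apply congrArg String.ofList
  rw [pv_enumerate_map]
  rw [List.map_map, List.map_map]
  have hfun : ((String.toList ∘ fun p => if (PySem.Int.mod p.1 2 == 0) = true then p.2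
        else PySem.Str.replace p.2 "#" "") ∘ fun (p : Int × List Char) => (p.1, String.ofList p.2))
      = fun (p : Int × List Char) =>
        (if PySem.Int.mod p.1 2 == 0 then p.2 else p.2.filter (· != '#')) := by
    funext p
    simp only [Function.comp_apply]
    by_cases hp : (PySem.Int.mod p.1 2 == 0) = true
    · rw [if_pos hp, if_pos hp, String.toList_ofList]
    · rw [if_neg hp, if_neg hp, PySem.Str.toList_replace, String.toList_ofList]
      rw [show ("#" : String).toList = ['#'] from by decide,
        show ("" : String).toList = [] from by decide]
      exact pv_replace_hash p.2
  rw [hfun]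
  rw [pv_enum_map _ 0 le_rfl]
  have h0 : (!(PySem.Int.mod 0 2 == 0)) = false := by decide
  rw [h0]
  rw [pv_main line.toList false]
  rw [pv_splitOn_single '`' line.toList]
  rfl
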